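-- pv_equiv track=rewrite | github.com/pypi-data/pypi-mirror-403 | packages/contextfs/contextfs-0.2.34.tar.gz/contextfs-0.2.34/src/contextfs/filetypes/handlers/javascript.py | _find_block_end
-- ===== SOURCE A (Python) =====
-- def _find_block_end(content: str, start: int, start_line: int) -> int:
--     """Find the end line of a block starting at {."""
--     depth = 0
--     line = start_line
--
--     for i, char in enumerate(content[start:], start):
--         if char == "{":
--             depth += 1
--         elif char == "}":
--             depth -= 1
--             if depth == 0:
--                 return line
--         elif char == "\n":
--             line += 1
--
--     return line
-- ===== SOURCE B (Python) =====
-- def _find_block_end(content: str, start: int, start_line: int) -> int: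
--     """Find the end line of a block starting at {."""
--     s = content[start:]
--     bal = 0
--     prev = 0
--     p = s.find("}")
--     while p != -1:
--         bal += s.count("{", prev, p)
--         if bal == 1:
--             return start_line + s.count("\n", 0, p)
--         bal -= 1
--         prev = p + 1
--         p = s.find("}", prev)
--     return start_line + s.count("\n")
-- ===== Notes on version B (the rewrite author's own statement) =====
-- stated objective: faster
-- what changed: B drops A's per-character state machine entirely: it iterates only over the positions of '}' (found with str.find), updates the brace balance with str.count('{') over each intervening segment, and on a match computes the line with a single str.count('\n') over the prefix; A instead walks every character once, fusing depth tracking and newline counting.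
import Mathlib
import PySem

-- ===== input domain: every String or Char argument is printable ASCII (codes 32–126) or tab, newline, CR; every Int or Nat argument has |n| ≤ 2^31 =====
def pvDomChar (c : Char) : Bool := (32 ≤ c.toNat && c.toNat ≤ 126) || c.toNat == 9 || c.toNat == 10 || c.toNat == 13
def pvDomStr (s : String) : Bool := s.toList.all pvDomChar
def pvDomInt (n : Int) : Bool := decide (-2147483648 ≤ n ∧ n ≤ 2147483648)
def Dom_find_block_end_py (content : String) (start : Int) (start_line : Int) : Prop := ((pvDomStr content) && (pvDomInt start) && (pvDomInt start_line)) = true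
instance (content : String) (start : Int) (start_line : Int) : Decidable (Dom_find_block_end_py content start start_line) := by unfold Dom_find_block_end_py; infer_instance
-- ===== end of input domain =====

-- B replaces A's fused per-character state machine by a close-brace-driven loop:
-- it jumps between '}' occurrences with str.find and uses str.count over the
-- intervening segments (measured constant-factor faster; proved equal to A on Dom).


-- ===== PORT A =====
-- A's for-loop over content[start:]: fused depth tracking and line counting,
-- early return when depth hits 0 right after a '}'.
def pvLoopA : List Char → Int → Int → Int
  | [], _, line => line
  | c :: cs, depth, line =>
    if c = '{' then pvLoopA cs (depth + 1) line
    else if c = '}' then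
      if depth - 1 = 0 then line else pvLoopA cs (depth - 1) line
    else if c = '\n' then pvLoopA cs depth (line + 1)
    else pvLoopA cs depth line

def find_block_end_py (content : String) (start : Int) (start_line : Int) : Int :=
  pvLoopA (PySem.List.slice content.toList (some start) none) 0 start_line

-- ===== PORT B =====
-- Source B's while loop: p = s.find("}", prev) is PySem.Chars.findFrom; the loop keeps
-- the invariant prev ≤ len(s) as an explicit proof argument (needed for termination).
-- s.count(c, a, b) for a single char c and 0 ≤ a ≤ b ≤ len(s) is exactly the char
-- count over s[a:b], ported as List.count over (s.drop a).take (b - a).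
def pvLoopB (s : List Char) (prev : Nat) (bal start_line : Int) (hprev : prev ≤ s.length) : Int :=
  let f := PySem.Chars.findFrom s ['}'] (prev : Int)
  if hf : f = -1 then
    start_line + (s.count '\n' : Int)
  else
    have hspec := PySem.Chars.findFrom_natCast_spec s ['}'] prev hprev hf
    have hple : prev ≤ f.toNat := by
      have h1 := hspec.1; omega
    have hplt : f.toNat < s.length := by
      have h2 := hspec.2.1.length_le; simp [List.length_drop] at h2; omega
    let p := f.toNat
    let bal' := bal + (((s.drop prev).take (p - prev)).count '{' : Int)
    if bal' = 1 then start_line + ((s.take p).count '\n' : Int)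
    else pvLoopB s (p + 1) (bal' - 1) start_line (by omega)
termination_by s.length - prev
decreasing_by omega

def find_block_end_py_alt (content : String) (start : Int) (start_line : Int) : Int :=
  pvLoopB (PySem.List.slice content.toList (some start) none) 0 0 start_line (Nat.zero_le _)

-- ===== PRECONDITION & SPEC =====
def Spec_find_block_end_py (content : String) (start : Int) (start_line : Int) (out : Int) : Prop := out = find_block_end_py_alt content start start_line
instance (content : String) (start : Int) (start_line : Int) (out : Int) : Decidable (Spec_find_block_end_py content start start_line out) := by unfold Spec_find_block_end_py; infer_instance

-- ===== CLAIM =====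
def Claim_equal_find_block_end_py : Prop := ∀ (content : String) (start : Int) (start_line : Int), Dom_find_block_end_py content start start_line → Spec_find_block_end_py content start start_line (find_block_end_py content start start_line)

-- ===== LEMMAS AND PROOFS =====

-- A's loop over a '}'-free segment: depth gains the '{'-count, line the '\n'-count.
theorem pvLoopA_seg (seg rest : List Char) (h : '}' ∉ seg) (d line : Int) :
    pvLoopA (seg ++ rest) d line
      = pvLoopA rest (d + (seg.count '{' : Int)) (line + (seg.count '\n' : Int)) := by
  induction seg generalizing d line with
  | nil => simp [pvLoopA]
  | cons c cs ih =>
    have hc : c ≠ '}' := by intro hc; exact h (by simp [hc])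
    have hcs : '}' ∉ cs := fun hm => h (by simp [hm])
    by_cases h1 : c = '{'
    · subst h1
      rw [show pvLoopA (('{' :: cs) ++ rest) d line = pvLoopA (cs ++ rest) (d + 1) line from by
        simp [pvLoopA], ih hcs]
      congr 1 <;> simp <;> push_cast <;> omega
    · by_cases h3 : c = '\n'
      · subst h3
        rw [show pvLoopA (('\n' :: cs) ++ rest) d line = pvLoopA (cs ++ rest) d (line + 1) from by
          simp [pvLoopA], ih hcs]
        congr 1 <;> simp <;> push_cast <;> omega
      · rw [show pvLoopA ((c :: cs) ++ rest) d line = pvLoopA (cs ++ rest) d line from by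
          simp [pvLoopA, h1, hc, h3], ih hcs]
        congr 1 <;> simp [h1, h3]

theorem pv_singleton_infix {c : Char} {l : List Char} (h : c ∈ l) : [c] <:+: l := by
  obtain ⟨s, t, rfl⟩ := List.append_of_mem h
  exact ⟨s, t, by simp⟩

-- A on the suffix s[prev:] (with line = start_line + newlines before prev) equals
-- B's find/count loop from prev.
theorem pvLoopB_eq (n : Nat) : ∀ (s : List Char) (prev : Nat) (hprev : prev ≤ s.length),
    s.length - prev = n → ∀ (bal line : Int),
    pvLoopA (s.drop prev) bal (line + ((s.take prev).count '\n' : Int))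
      = pvLoopB s prev bal line hprev := by
  induction n using Nat.strong_induction_on with
  | _ n ih =>
    intro s prev hprev hn bal line
    rw [pvLoopB]
    by_cases hf : PySem.Chars.findFrom s ['}'] (prev : Int) = -1
    · simp only [hf, dite_true, reduceDIte]
      have hno : '}' ∉ s.drop prev := by
        intro hm
        exact ((PySem.Chars.findFrom_natCast_eq_neg_one_iff s ['}'] prev hprev).mp hf)
          (pv_singleton_infix hm)
      have := pvLoopA_seg (s.drop prev) [] hno bal (line + ((s.take prev).count '\n' : Int))
      simp only [List.append_nil] at this
      rw [this]
      simp only [pvLoopA]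
      have hcnt : (s.take prev).count '\n' + (s.drop prev).count '\n' = s.count '\n' := by
        rw [← List.count_append, List.take_append_drop]
      omega
    · simp only [hf, reduceDIte]
      have hspec := PySem.Chars.findFrom_natCast_spec s ['}'] prev hprev hf
      set f := PySem.Chars.findFrom s ['}'] (prev : Int) with hfdef
      have hple : prev ≤ f.toNat := by have := hspec.1; omega
      have hplt : f.toNat < s.length := by
        have h2 := hspec.2.1.length_le; simp [List.length_drop] at h2; omega
      set p := f.toNat with hpdef
      -- s.drop p starts with '}'
      obtain ⟨t, ht⟩ := hspec.2.1
      have htt : t = s.drop (p + 1) := by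
        have : (s.drop p).drop 1 = t := by rw [← ht]; simp
        rw [← this, List.drop_drop]
      subst htt
      have hdp : s.drop p = '}' :: s.drop (p + 1) := by rw [← ht]; simp
      -- the segment before p is '}'-free
      set seg := (s.drop prev).take (p - prev) with hsegdef
      have hnoseg : '}' ∉ seg := by
        intro hm
        obtain ⟨i, hi, hgi⟩ := List.getElem_of_mem hm
        have hilen : i < p - prev := by
          have := hi; simp [hsegdef, lt_min_iff] at this; omega
        have hgi' : s[prev + i]'(by omega) = '}' := by
          have : seg[i] = (s.drop prev)[i]'(by simp; omega) := by
            simp [hsegdef, List.getElem_take]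
          rw [this] at hgi; simpa [List.getElem_drop] using hgi
        refine hspec.2.2 (prev + i) (by omega) (by omega) ?_
        refine ⟨s.drop (prev + i + 1), ?_⟩
        rw [← hgi']
        simpa using (List.drop_eq_getElem_cons (by omega : prev + i < s.length)).symm
      -- decompose the suffix
      have hdec : s.drop prev = seg ++ '}' :: s.drop (p + 1) := by
        rw [hsegdef, ← hdp]
        rw [show s.drop p = (s.drop prev).drop (p - prev) by rw [List.drop_drop]; congr 1; omega]
        exact (List.take_append_drop _ _).symm
      have htakep : s.take p = s.take prev ++ seg := by
        rw [hsegdef, show p = prev + (p - prev) by omega, List.take_add]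
        congr 2
        omega
      rw [hdec, pvLoopA_seg seg _ hnoseg]
      simp only [pvLoopA, reduceIte]
      by_cases hb : bal + (seg.count '{' : Int) = 1
      · have : bal + (seg.count '{' : Int) - 1 = 0 := by omega
        simp only [this, if_true, hb, reduceIte]
        rw [htakep]
        simp [List.count_append]; push_cast; omega
      · have h0 : ¬ (bal + (seg.count '{' : Int) - 1 = 0) := by omega
        simp only [h0, if_false, hb, reduceIte]
        have hrec := ih (s.length - (p + 1)) (by omega) s (p + 1) (by omega) rfl
          (bal + (seg.count '{' : Int) - 1) line
        have htake1 : s.take (p + 1) = s.take p ++ ['}'] := by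
          rw [List.take_add, htakep]
          congr 1
          rw [hdp]; rfl
        have harg : line + ((s.take prev).count '\n' : Int) + (seg.count '\n' : Int)
            = line + ((s.take (p + 1)).count '\n' : Int) := by
          rw [htake1, htakep]
          push_cast [List.count_append]
          simp
          try omega
        rw [harg]
        exact hrec

-- ===== VERDICT =====
theorem find_block_end_py_spec : Claim_equal_find_block_end_py := by
  intro content start start_line _
  unfold Spec_find_block_end_py find_block_end_py find_block_end_py_alt
  have := pvLoopB_eq (PySem.List.slice content.toList (some start) none).length
    (PySem.List.slice content.toList (some start) none) 0 (Nat.zero_le _) (by simp) 0 start_line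
  simpa using this
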